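-- pv_equiv track=rewrite | github.com/IamMikeHelsel/bifrost | packages/bifrost/src/bifrost/modbus.py | _optimize_write_ranges
-- ===== SOURCE A (Python) =====
-- from typing import Any
--
-- def _optimize_write_ranges(writes: list[tuple[int, Any, str]]) -> list[tuple[int, list[Any], list[str]]]:
--     """Optimize write operations into efficient ranges.
--
--     Returns:
--         List of (start_addr, values, original_addresses) tuples
--     """
--     if not writes:
--         return []
--
--     ranges = []
--     current_start = writes[0][0]
--     current_values = [writes[0][1]]
--     current_addresses = [writes[0][2]]
--
--     for i in range(1, len(writes)):
--         reg_addr, value, original_addr = writes[i]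
--
--         # If address is consecutive, extend range
--         if reg_addr == current_start + len(current_values):
--             current_values.append(value)
--             current_addresses.append(original_addr)
--         else:
--             # Start new range
--             ranges.append((current_start, current_values, current_addresses))
--             current_start = reg_addr
--             current_values = [value]
--             current_addresses = [original_addr]
--
--     # Add final range
--     ranges.append((current_start, current_values, current_addresses))
--
--     return ranges
-- ===== SOURCE B (Python) =====
-- def _optimize_write_ranges(writes):
--     """Two-pointer run splitting: find each maximal consecutive-address run
--     [i, j) in one inner scan, then emit it via slicing."""
--     out = []
--     i = 0
--     n = len(writes)
--     while i < n:
--         j = i + 1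
--         while j < n and writes[j][0] == writes[j - 1][0] + 1:
--             j += 1
--         run = writes[i:j]
--         out.append((run[0][0], [w[1] for w in run], [w[2] for w in run]))
--         i = j
--     return out
-- ===== Notes on version B (the rewrite author's own statement) =====
-- stated objective: alternative
-- what changed: Replaces A's accumulator state machine (current_start/current_values grown element by element with a start-new-range branch) by a two-pointer scan that locates each maximal consecutive run and emits it at once via slicing/comprehensions.
import Mathlib
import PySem

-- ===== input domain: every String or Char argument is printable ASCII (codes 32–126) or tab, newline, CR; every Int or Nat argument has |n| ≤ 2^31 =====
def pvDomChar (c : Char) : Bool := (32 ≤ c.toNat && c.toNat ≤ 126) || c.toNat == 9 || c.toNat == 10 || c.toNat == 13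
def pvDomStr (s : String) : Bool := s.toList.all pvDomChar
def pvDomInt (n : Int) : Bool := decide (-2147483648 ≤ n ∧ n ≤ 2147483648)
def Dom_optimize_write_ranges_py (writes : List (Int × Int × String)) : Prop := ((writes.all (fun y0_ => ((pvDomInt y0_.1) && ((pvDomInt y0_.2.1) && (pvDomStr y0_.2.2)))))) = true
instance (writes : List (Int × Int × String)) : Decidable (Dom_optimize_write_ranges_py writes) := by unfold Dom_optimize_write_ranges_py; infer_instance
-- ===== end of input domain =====

-- B replaces A's accumulator loop by a two-pointer maximal-run scan; alternative decomposition, same O(n) cost.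


-- ===== PORT A =====
-- A's loop over range(1, len(writes)) with state (ranges, current_start, current_values, current_addresses)
def pvLoopA : List (Int × Int × String) → List (Int × List Int × List String) → Int → List Int → List String → List (Int × List Int × List String)
  | [], ranges, s, vals, addrs => ranges ++ [(s, vals, addrs)]
  | (a, v, o) :: tl, ranges, s, vals, addrs =>
    if a = s + (vals.length : Int) then
      pvLoopA tl ranges s (vals ++ [v]) (addrs ++ [o])
    else
      pvLoopA tl (ranges ++ [(s, vals, addrs)]) a [v] [o]

def optimize_write_ranges_py (writes : List (Int × Int × String)) : List (Int × List Int × List String) :=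
  match writes with
  | [] => []
  | (a, v, o) :: tl => pvLoopA tl [] a [v] [o]

-- ===== PORT B =====
-- inner while loop of Source B: extend j while writes[j][0] == writes[j-1][0] + 1; returns the run's
-- values and original addresses together with the remaining writes
def pvTakeRun (prev : Int) : List (Int × Int × String) → List Int × List String × List (Int × Int × String)
  | [] => ([], [], [])
  | (a, v, o) :: tl =>
    if a = prev + 1 then
      let r := pvTakeRun a tl
      (v :: r.1, o :: r.2.1, r.2.2)
    else ([], [], (a, v, o) :: tl)

theorem pvTakeRun_rest_length (prev : Int) (l : List (Int × Int × String)) :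
    (pvTakeRun prev l).2.2.length ≤ l.length := by
  induction l generalizing prev with
  | nil => simp [pvTakeRun]
  | cons h tl ih =>
    obtain ⟨a, v, o⟩ := h
    simp only [pvTakeRun]
    split
    · exact Nat.le_succ_of_le (ih a)
    · simp

-- outer while loop of Source B: emit one maximal run, continue on the rest
def optimize_write_ranges_py_alt : List (Int × Int × String) → List (Int × List Int × List String)
  | [] => []
  | (a, v, o) :: tl =>
    let r := pvTakeRun a tl
    (a, v :: r.1, o :: r.2.1) :: optimize_write_ranges_py_alt r.2.2
termination_by writes => writes.length
decreasing_by
  simpa using Nat.lt_succ_of_le (pvTakeRun_rest_length a tl)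

-- ===== PRECONDITION & SPEC =====
def Spec_optimize_write_ranges_py (writes : List (Int × Int × String)) (out : List (Int × List Int × List String)) : Prop := out = optimize_write_ranges_py_alt writes
instance (writes : List (Int × Int × String)) (out : List (Int × List Int × List String)) : Decidable (Spec_optimize_write_ranges_py writes out) := by unfold Spec_optimize_write_ranges_py; infer_instance

-- ===== CLAIM (what is proved, stated in full; the proofs are below) =====
def Claim_equal_optimize_write_ranges_py : Prop := ∀ (writes : List (Int × Int × String)), Dom_optimize_write_ranges_py writes → Spec_optimize_write_ranges_py writes (optimize_write_ranges_py writes)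

-- ===== LEMMAS AND PROOFS =====

-- A's loop, started with an open range (s, vals, addrs), produces that range extended by
-- the maximal run following it (whose next expected address is s + vals.length), then B's output of the rest.
theorem pvLoopA_eq (tl : List (Int × Int × String)) :
    ∀ (ranges : List (Int × List Int × List String)) (s : Int) (vals : List Int) (addrs : List String),
      pvLoopA tl ranges s vals addrs =
        ranges ++ ((s, vals ++ (pvTakeRun (s + (vals.length : Int) - 1) tl).1,
                      addrs ++ (pvTakeRun (s + (vals.length : Int) - 1) tl).2.1)
          :: optimize_write_ranges_py_alt (pvTakeRun (s + (vals.length : Int) - 1) tl).2.2) := by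
  induction tl with
  | nil => intro ranges s vals addrs; simp [pvLoopA, pvTakeRun, optimize_write_ranges_py_alt]
  | cons h tl ih =>
    obtain ⟨a, v, o⟩ := h
    intro ranges s vals addrs
    simp only [pvLoopA, pvTakeRun]
    by_cases hc : a = s + (vals.length : Int)
    · have hc' : a = s + (vals.length : Int) - 1 + 1 := by omega
      rw [if_pos hc, if_pos hc', ih]
      have h2 : s + (((vals ++ [v]).length : Nat) : Int) - 1 = a := by
        simp [hc]; omega
      rw [h2]
      simp [hc]
    · have hc' : ¬ a = s + (vals.length : Int) - 1 + 1 := by omega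
      rw [if_neg hc, if_neg hc', ih]
      have h1 : a + (([v] : List Int).length : Int) - 1 = a := by simp
      rw [h1]
      simp [optimize_write_ranges_py_alt]

-- ===== VERDICT (by name: the statement is the Claim_ definition above) =====
theorem optimize_write_ranges_py_spec : Claim_equal_optimize_write_ranges_py := by
  intro writes _
  unfold Spec_optimize_write_ranges_py
  match writes with
  | [] => simp [optimize_write_ranges_py, optimize_write_ranges_py_alt]
  | (a, v, o) :: tl =>
    show pvLoopA tl [] a [v] [o] = _
    rw [pvLoopA_eq]
    have h1 : a + (([v] : List Int).length : Int) - 1 = a := by simp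
    rw [h1]
    simp [optimize_write_ranges_py_alt]
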